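-- pv_equiv track=rewrite | github.com/HBinhCT/Q-project | hackerearth/Math/Number Theory/Primality Tests/Save Girlfriend/solution.py | get_min_health
-- ===== SOURCE A (Python) =====
-- from math import ceil
--
-- def get_min_health(start, end):
--     divisors = [0] * (end - start + 1)
--     i = 1
--     highest = 0
--     while i * i <= end:
--         j = max(i, int(ceil(start / i)) * i)
--         while j <= end:
--             divisors[j - start] += 1
--             k = j // i
--             if k * k > end:
--                 divisors[j - start] += 1
--             highest = max(highest, divisors[j - start])
--             j += i
--         i += 1
--     return divisors.count(highest) + 1
-- ===== SOURCE B (Python) =====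
-- def get_min_health(start, end):
--     counts = []
--     for n in range(start, end + 1):
--         c = 0
--         i = 1
--         while i * i <= n:
--             if n % i == 0:
--                 c += 1
--                 if i != n // i:
--                     c += 1
--             i += 1
--         counts.append(c)
--     highest = max(counts) if counts else 0
--     return counts.count(highest) + 1
-- ===== Notes on version B (the rewrite author's own statement) =====
-- stated objective: alternative
-- what changed: A sieves divisor counts by marking every multiple of each i up to sqrt(end) across the whole range while tracking a running maximum; B computes each number's divisor count independently by trial division up to sqrt(n) and then takes max/count over the finished list.
import Mathlib
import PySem

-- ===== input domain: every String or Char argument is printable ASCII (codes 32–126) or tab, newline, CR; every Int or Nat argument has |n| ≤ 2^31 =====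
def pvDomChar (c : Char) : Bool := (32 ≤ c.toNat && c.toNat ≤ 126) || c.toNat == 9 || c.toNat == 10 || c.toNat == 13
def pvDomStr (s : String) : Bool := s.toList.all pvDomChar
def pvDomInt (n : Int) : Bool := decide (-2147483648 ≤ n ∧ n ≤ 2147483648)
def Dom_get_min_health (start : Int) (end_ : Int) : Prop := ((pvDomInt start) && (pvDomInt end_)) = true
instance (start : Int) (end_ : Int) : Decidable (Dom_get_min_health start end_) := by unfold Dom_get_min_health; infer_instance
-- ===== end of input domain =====

-- B replaces A's divisor sieve (marking multiples of each i ≤ √end across the whole range) by an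
-- independent per-number trial-division divisor count: an alternative algorithm, simpler to read.


-- ===== PORT A =====
-- A's inner while loop over j (j += i); the hypothesis argument hi only justifies termination
-- the Python list `divisors` is an Array; every access divisors[j - start] has start ≤ j ≤ end_,
-- so the index is in range and set/get are exact
def aInner (start : Int) (end_ : Int) (i : Int) (hi : 1 ≤ i) (j : Int) (L : Array Int) (h : Int) : Array Int × Int :=
  if _hj : j ≤ end_ then
    let L1 := L.setIfInBounds (j - start).toNat (L.getD (j - start).toNat 0 + 1)
    let k := PySem.Int.floordiv j i
    let L2 := if k * k > end_ then L1.setIfInBounds (j - start).toNat (L1.getD (j - start).toNat 0 + 1) else L1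
    let h1 := max h (L2.getD (j - start).toNat 0)
    aInner start end_ i hi (j + i) L2 h1
  else (L, h)
termination_by (end_ + 1 - j).toNat
decreasing_by omega

-- A's outer while loop over i.  `int(ceil(start / i))` is ported as exact ceiling division
-- -((-start) // i), which is what the float expression computes for every |start| ≤ 2^31, 1 ≤ i ≤ 46341.
def aOuter (start : Int) (end_ : Int) (i : Int) (hi : 1 ≤ i) (L : Array Int) (h : Int) : Array Int × Int :=
  if hc : i * i ≤ end_ then
    let j0 := max i (-(PySem.Int.floordiv (-start) i) * i)
    let r := aInner start end_ i hi j0 L h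
    aOuter start end_ (i + 1) (by omega) r.1 r.2
  else (L, h)
termination_by (end_ + 1 - i).toNat
decreasing_by
  have h1 : i ≤ i * i := le_mul_of_one_le_left (by omega) hi
  omega

def get_min_health (start : Int) (end_ : Int) : Int :=
  let divisors : Array Int := Array.replicate (end_ - start + 1).toNat 0
  let r := aOuter start end_ 1 (by norm_num) divisors 0
  PySem.List.count r.1.toList r.2 + 1

-- ===== PORT B =====
-- B's trial-division loop: while i*i <= n, counting i and (when distinct) its cofactor n // i
def bTrial (n : Int) (i : Int) (hi : 1 ≤ i) (c : Int) : Int :=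
  if _h : i * i ≤ n then
    let c1 := if PySem.Int.mod n i = 0 then
                (if i ≠ PySem.Int.floordiv n i then (c + 1) + 1 else c + 1)
              else c
    bTrial n (i + 1) (by omega) c1
  else c
termination_by (n + 1 - i).toNat
decreasing_by
  have h1 : i ≤ i * i := le_mul_of_one_le_left (by omega) hi
  omega

def get_min_health_alt (start : Int) (end_ : Int) : Int :=
  let counts := (PySem.List.pyRange start (end_ + 1) 1).foldl (fun acc n => acc ++ [bTrial n 1 (by norm_num) 0]) ([] : List Int)
  let highest := if counts = [] then 0 else (PySem.List.max? counts (fun x => x)).getD 0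
  PySem.List.count counts highest + 1

-- ===== PRECONDITION & SPEC =====
def Spec_get_min_health (start : Int) (end_ : Int) (out : Int) : Prop := out = get_min_health_alt start end_
instance (start : Int) (end_ : Int) (out : Int) : Decidable (Spec_get_min_health start end_ out) := by unfold Spec_get_min_health; infer_instance

-- ===== CLAIM (what is proved, stated in full; the proofs are below) =====
def Claim_equal_get_min_health : Prop := ∀ (start : Int) (end_ : Int), Dom_get_min_health start end_ → Spec_get_min_health start end_ (get_min_health start end_)

-- ===== LEMMAS AND PROOFS =====

-- the maximum of a list together with 0 (the value A's running `highest` tracks)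
def pvMax0 (L : List Int) : Int := L.foldl max 0

-- contribution of outer index t to position n of A's sieve
def pvFA (end_ n : Int) (t : Nat) : Int :=
  if ((t : Int) ∣ n ∧ (t : Int) ≤ n) then
    (if PySem.Int.floordiv n t * PySem.Int.floordiv n t > end_ then 2 else 1) else 0

-- contribution of trial index t to B's divisor count of n
def pvFB (n : Int) (t : Nat) : Int :=
  if ((t : Int) ∣ n) then (if (t : Int) ≠ PySem.Int.floordiv n t then 2 else 1) else 0

lemma foldl_max_le (L : List Int) (a c : Int) (ha : a ≤ c) (hall : ∀ x ∈ L, x ≤ c) :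
    L.foldl max a ≤ c := by
  induction L generalizing a with
  | nil => exact ha
  | cons y t ih =>
      exact ih (max a y) (max_le ha (hall y (by simp))) (fun x hx => hall x (by simp [hx]))
lemma max0_nonneg (L : List Int) : 0 ≤ pvMax0 L := (PySem.List.le_foldl_max L 0).1
lemma le_max0 (L : List Int) {x : Int} (hx : x ∈ L) : x ≤ pvMax0 L :=
  (PySem.List.le_foldl_max L 0).2 x hx
lemma max0_le (L : List Int) (c : Int) (h0 : 0 ≤ c) (hall : ∀ x ∈ L, x ≤ c) : pvMax0 L ≤ c :=
  foldl_max_le L 0 c h0 hall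
lemma max0_set (L : List Int) (q : Nat) (x : Int) (hq : q < L.length)
    (hx : L.getD q 0 ≤ x) : pvMax0 (L.set q x) = max (pvMax0 L) x := by
  apply le_antisymm
  · apply max0_le _ _ (le_max_of_le_left (max0_nonneg L))
    intro y hy
    rcases List.mem_or_eq_of_mem_set hy with hy | rfl
    · exact le_max_of_le_left (le_max0 L hy)
    · exact le_max_right _ _
  · apply max_le
    · apply max0_le _ _ (max0_nonneg _)
      intro y hy
      rcases List.mem_iff_getElem.1 hy with ⟨r, hr, rfl⟩
      by_cases hrq : r = q
      · subst hrq
        calc L[r] = L.getD r 0 := (List.getD_eq_getElem L 0 hr).symm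
          _ ≤ x := hx
          _ ≤ pvMax0 (L.set r x) := by
              have hr2 : r < (L.set r x).length := by simpa using hr
              have hx2 : (L.set r x)[r] = x := List.getElem_set_self hr2
              exact le_max0 _ (List.mem_of_getElem hx2)
      · refine le_max0 _ ?_
        have hr2 : r < (L.set q x).length := by simpa using hr
        have he : (L.set q x)[r]'hr2 = L[r] := by
          rw [List.getElem_set_ne (by omega)]
        exact List.mem_of_getElem he
    · refine le_max0 _ ?_
      have hq2 : q < (L.set q x).length := by simpa using hq
      have he : (L.set q x)[q]'hq2 = x := List.getElem_set_self hq2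
      exact List.mem_of_getElem he
lemma arr_getD (a : Array Int) (i : Nat) (d : Int) : a.getD i d = a.toList.getD i d := by
  simp [Array.getD, List.getD]
  split
  · next h => simp [h]
  · next h =>
      rw [Array.getElem?_eq_none (Nat.le_of_not_lt h)]
      rfl

lemma getD_set_self (L : List Int) (q : Nat) (x : Int) (hq : q < L.length) :
    (L.set q x).getD q 0 = x := by
  simp [List.getD, hq]

lemma getD_set_ne (L : List Int) (q p : Nat) (x : Int) (hne : q ≠ p) :
    (L.set q x).getD p 0 = L.getD p 0 := by
  simp [List.getD, hne]

lemma sq_le_iff (e i : Int) (hi : 1 ≤ i) : i * i ≤ e ↔ i.toNat ≤ Nat.sqrt e.toNat := by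
  by_cases he : 0 ≤ e
  · rw [Nat.le_sqrt]
    constructor
    · intro h
      have : (↑(i.toNat * i.toNat) : Int) ≤ ↑e.toNat := by
        push_cast [Int.toNat_of_nonneg he, Int.toNat_of_nonneg (by omega : (0:Int) ≤ i)]
        exact h
      exact_mod_cast this
    · intro h
      have : (↑(i.toNat * i.toNat) : Int) ≤ ↑e.toNat := by exact_mod_cast h
      rw [Int.toNat_of_nonneg he] at this
      push_cast [Int.toNat_of_nonneg (by omega : (0:Int) ≤ i)] at this
      exact this
  · have h1 : ¬ (i * i ≤ e) := by nlinarith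
    have h2 : e.toNat = 0 := by omega
    simp [h1, h2]
    omega
lemma aInner_spec (start end_ i : Int) (hi : 1 ≤ i) (j : Int) (L : Array Int) (h : Int)
    (hij : i ∣ j) (hsj : start ≤ j) (hlen : L.toList.length = (end_ - start + 1).toNat)
    (hh : h = pvMax0 L.toList) :
    ((aInner start end_ i hi j L h).1.toList.length = L.toList.length)
    ∧ (∀ p : Nat, p < L.toList.length →
        (aInner start end_ i hi j L h).1.toList.getD p 0
          = L.toList.getD p 0 + (if (i ∣ (start + (p : Int)) ∧ j ≤ start + (p : Int)) then
              (if PySem.Int.floordiv (start + (p : Int)) i * PySem.Int.floordiv (start + (p : Int)) i > end_ then 2 else 1) else 0))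
    ∧ (aInner start end_ i hi j L h).2 = pvMax0 (aInner start end_ i hi j L h).1.toList := by
  fun_induction aInner start end_ i hi j L h with
  | case1 j L h hle L1 k L2 hm1 ih =>
      -- q : the updated index
      set q : Nat := (j - start).toNat with hqdef
      have hq : q < L.toList.length := by omega
      have hjq : start + (q : Int) = j := by omega
      -- weight
      set w : Int := if PySem.Int.floordiv j i * PySem.Int.floordiv j i > end_ then 2 else 1 with hwdef
      have hts : L1.toList = L.toList.set q (L.toList.getD q 0 + 1) := by
        simp only [L1, Array.toList_setIfInBounds, arr_getD]
        rw [hqdef]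
      have hL2 : L2.toList = L.toList.set q (L.toList.getD q 0 + w) := by
        simp only [L2, k, hwdef]
        split_ifs with hc
        · rw [Array.toList_setIfInBounds, arr_getD, hts, getD_set_self _ _ _ hq, List.set_set]
          ring_nf
        · rw [hts]
      have hlen2 : L2.toList.length = L.toList.length := by rw [hL2]; simp
      have hw0 : (0:Int) ≤ w := by rw [hwdef]; split_ifs <;> norm_num
      have hh2 : hm1 = pvMax0 L2.toList := by
        simp only [hm1, arr_getD, hL2]
        rw [getD_set_self _ _ _ hq, max0_set L.toList q _ hq (by omega), hh]
      obtain ⟨ihlen, ihpt, ihmax⟩ := ih (dvd_add hij (dvd_refl i)) (by omega) (by omega) hh2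
      refine ⟨by omega, ?_, ihmax⟩
      intro p hp
      rw [ihpt p (by omega)]
      by_cases hpq : p = q
      · subst hpq
        rw [hL2, getD_set_self _ _ _ hq, hjq]
        have hnot : ¬ (i ∣ j ∧ j + i ≤ j) := fun hc => by omega
        rw [if_neg hnot, if_pos ⟨hij, le_refl j⟩, ← hwdef]
        ring
      · rw [hL2, getD_set_ne _ _ _ _ (fun hh' => hpq hh'.symm)]
        have hiff : (i ∣ (start + (p : Int)) ∧ j ≤ start + (p : Int))
            ↔ (i ∣ (start + (p : Int)) ∧ j + i ≤ start + (p : Int)) := by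
          constructor
          · rintro ⟨hd, hle2⟩
            refine ⟨hd, ?_⟩
            have hdd : i ∣ (start + (p : Int)) - j := hd.sub hij
            have hne : start + (p : Int) ≠ j := by omega
            have hpos : 0 < start + (p : Int) - j := by omega
            have := Int.le_of_dvd hpos hdd
            omega
          · rintro ⟨hd, hle2⟩
            exact ⟨hd, by omega⟩
        rw [if_congr hiff rfl rfl]
  | case2 j L h hgt =>
      refine ⟨rfl, ?_, hh⟩
      intro p hp
      have : ¬ (j ≤ start + (p : Int)) := by omega
      simp [this]

lemma aOuter_spec (start end_ i : Int) (hi : 1 ≤ i) (L : Array Int) (h : Int)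
    (hlen : L.toList.length = (end_ - start + 1).toNat) (hh : h = pvMax0 L.toList) :
    ((aOuter start end_ i hi L h).1.toList.length = L.toList.length)
    ∧ (∀ p : Nat, p < L.toList.length →
        (aOuter start end_ i hi L h).1.toList.getD p 0
          = L.toList.getD p 0 + ∑ t ∈ Finset.Ico i.toNat (Nat.sqrt end_.toNat + 1), pvFA end_ (start + (p : Int)) t)
    ∧ (aOuter start end_ i hi L h).2 = pvMax0 (aOuter start end_ i hi L h).1.toList := by
  fun_induction aOuter start end_ i hi L h with
  | case1 i hi L h hc j0 r ih =>
      -- ceiling division bracket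
      set c : Int := -(PySem.Int.floordiv (-start) i) with hcdef
      have hbr : (c - 1) * i < start ∧ start ≤ c * i :=
        (PySem.Int.neg_floordiv_neg_eq_iff_of_pos (by omega : (0:Int) < i)).1 rfl
      have hj0eq : j0 = max i (c * i) := rfl
      have hij0 : i ∣ j0 := by
        rw [hj0eq]
        rcases le_total i (c * i) with hm | hm
        · rw [max_eq_right hm]; exact Dvd.intro_left c rfl
        · rw [max_eq_left hm]
      have hsj0 : start ≤ j0 := by rw [hj0eq]; exact le_trans hbr.2 (le_max_right _ _)
      obtain ⟨ilen, ipt, imax⟩ := aInner_spec start end_ i hi j0 L h hij0 hsj0 hlen hh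
      rw [show (aInner start end_ i hi j0 L h) = r from rfl] at ilen ipt imax
      obtain ⟨olen, opt, omax⟩ := ih (ilen.trans hlen) imax
      refine ⟨by omega, ?_, omax⟩
      intro p hp
      rw [opt p (by omega), ipt p hp]
      have hlt : i.toNat < Nat.sqrt end_.toNat + 1 := by
        have := (sq_le_iff end_ i hi).1 hc
        omega
      rw [Finset.sum_eq_sum_Ico_succ_bot hlt]
      have hi1 : (i + 1).toNat = i.toNat + 1 := by omega
      rw [hi1]
      -- identify the inner-loop hit with pvFA
      have hfa : (if (i ∣ (start + (p : Int)) ∧ j0 ≤ start + (p : Int)) then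
              (if PySem.Int.floordiv (start + (p : Int)) i * PySem.Int.floordiv (start + (p : Int)) i > end_ then 2 else 1) else 0)
          = pvFA end_ (start + (p : Int)) i.toNat := by
        set n : Int := start + (p : Int) with hndef
        have hcast : ((i.toNat : Int)) = i := by omega
        have hsn : start ≤ n := by omega
        rw [pvFA, hcast]
        by_cases hd : i ∣ n
        · have h1 : j0 ≤ n ↔ i ≤ n := by
            constructor
            · intro hj0n
              have : i ≤ j0 := le_max_left _ _
              omega
            · intro hin
              have hci : c * i ≤ n := by
                by_contra hcon
                push Not at hcon
                have hdd : i ∣ (c * i - n) := (Dvd.intro_left c rfl).sub hd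
                have : 0 < c * i - n := by omega
                have := Int.le_of_dvd this hdd
                nlinarith [hbr.1]
              rw [hj0eq]
              exact max_le hin hci
          rw [if_congr (and_congr_right fun _ => h1) rfl rfl]
        · simp [hd]
      rw [hfa]
      ring
  | case2 i hi L h hgt =>
      refine ⟨rfl, ?_, hh⟩
      intro p hp
      have : Nat.sqrt end_.toNat + 1 ≤ i.toNat := by
        have := (sq_le_iff end_ i hi).not.1 hgt
        omega
      rw [Finset.Ico_eq_empty (by omega)]
      simp

lemma bTrial_spec (n i : Int) (hi : 1 ≤ i) (c : Int) :
    bTrial n i hi c = c + ∑ t ∈ Finset.Ico i.toNat (Nat.sqrt n.toNat + 1), pvFB n t := by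
  fun_induction bTrial n i hi c with
  | case1 i hi c hle c1 ih =>
      rw [ih]
      have hlt : i.toNat < Nat.sqrt n.toNat + 1 := by
        have := (sq_le_iff n i hi).1 hle
        omega
      rw [Finset.sum_eq_sum_Ico_succ_bot hlt]
      have hcast : ((i.toNat : Int)) = i := by omega
      have hi1 : (i + 1).toNat = i.toNat + 1 := by omega
      rw [hi1]
      simp only [c1, pvFB, hcast, PySem.Int.mod_eq_zero_iff_dvd]
      split_ifs <;> ring
  | case2 i hi c hgt =>
      have : Nat.sqrt n.toNat + 1 ≤ i.toNat := by
        have := (sq_le_iff n i hi).not.1 hgt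
        omega
      rw [Finset.Ico_eq_empty (by omega)]
      simp

lemma pvKey (n X : Nat) (h1 : 1 ≤ n) (hX : n ≤ X) :
    ∑ d ∈ n.divisors.filter (fun d => d * d ≤ X), (if (n / d) * (n / d) > X then (2 : Int) else 1)
      = (n.divisors.card : Int) := by
  have hn0 : n ≠ 0 := by omega
  have hsplit : ∀ d ∈ n.divisors.filter (fun d => d * d ≤ X),
      (if (n / d) * (n / d) > X then (2 : Int) else 1)
        = 1 + (if (n / d) * (n / d) > X then (1 : Int) else 0) := by
    intro d _; split_ifs <;> norm_num
  have hbij : (n.divisors.filter (fun d => d * d ≤ X ∧ (n / d) * (n / d) > X)).card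
      = (n.divisors.filter (fun d => ¬ (d * d ≤ X))).card := by
    apply Finset.card_nbij' (fun d => n / d) (fun d => n / d)
    · intro d hd
      simp only [Finset.coe_filter, Set.mem_setOf_eq, Nat.mem_divisors] at hd ⊢
      obtain ⟨⟨hdvd, _⟩, _, hgt⟩ := hd
      exact ⟨⟨Nat.div_dvd_of_dvd hdvd, hn0⟩, by omega⟩
    · intro d hd
      simp only [Finset.coe_filter, Set.mem_setOf_eq, Nat.mem_divisors] at hd ⊢
      obtain ⟨⟨hdvd, _⟩, hgt⟩ := hd
      have hgt' : X < d * d := by omega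
      obtain ⟨k, hk⟩ := hdvd
      have hd0 : 0 < d := by
        rcases Nat.eq_zero_or_pos d with h | h
        · subst h; simp at hk; omega
        · exact h
      have hnd : n / d = k := by rw [hk, Nat.mul_div_cancel_left k hd0]
      have hkd : k < d := by
        by_contra hcon
        have hcon' : d ≤ k := by omega
        have : d * d ≤ d * k := Nat.mul_le_mul_left d hcon'
        omega
      have hkk : k * k ≤ X := by
        have h2 : k * k ≤ k * d := Nat.mul_le_mul_left k (le_of_lt hkd)
        have h3 : k * d = n := by rw [hk]; ring
        omega
      have hnk : X < n / k * (n / k) := by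
        have hself : n / (n / d) = d := Nat.div_div_self ⟨k, hk⟩ hn0
        rw [hnd] at hself
        rw [hself]
        exact hgt'
      refine ⟨⟨⟨d, by rw [hk, Nat.mul_div_cancel_left k hd0]; ring⟩, hn0⟩, by rw [hnd]; exact hkk, by rw [hnd]; omega⟩
    · intro d hd
      simp only [Finset.coe_filter, Set.mem_setOf_eq, Nat.mem_divisors] at hd
      exact Nat.div_div_self hd.1.1 hn0
    · intro d hd
      simp only [Finset.coe_filter, Set.mem_setOf_eq, Nat.mem_divisors] at hd
      exact Nat.div_div_self hd.1.1 hn0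
  rw [Finset.sum_congr rfl hsplit, Finset.sum_add_distrib, Finset.sum_const,
    ← Finset.sum_filter, Finset.filter_filter, Finset.sum_const]
  simp only [nsmul_eq_mul, mul_one]
  rw [hbij, ← Nat.cast_add]
  exact congrArg _ (Finset.card_filter_add_card_filter_not _)

lemma ico_to_divisors (n : Int) (h1 : 1 ≤ n) (X : Nat) (_hnX : n.toNat ≤ X) :
    ∑ t ∈ Finset.Ico 1 (Nat.sqrt X + 1), pvFA (X : Int) n t
      = ∑ d ∈ n.toNat.divisors.filter (fun d => d * d ≤ X),
          (if (n.toNat / d) * (n.toNat / d) > X then (2 : Int) else 1) := by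
  have hcast : ((n.toNat : Int)) = n := by omega
  have hn0 : n.toNat ≠ 0 := by omega
  simp only [pvFA]
  rw [← Finset.sum_filter]
  have hset : (Finset.Ico 1 (Nat.sqrt X + 1)).filter (fun t : Nat => ((t:Int) ∣ n ∧ (t:Int) ≤ n))
      = n.toNat.divisors.filter (fun d => d * d ≤ X) := by
    ext t
    simp only [Finset.mem_filter, Finset.mem_Ico, Nat.mem_divisors]
    constructor
    · rintro ⟨⟨ht1, ht2⟩, hdvd, _⟩
      have hdn : t ∣ n.toNat := by
        rwa [← hcast, Int.natCast_dvd_natCast] at hdvd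
      exact ⟨⟨hdn, hn0⟩, Nat.le_sqrt.1 (by omega)⟩
    · rintro ⟨⟨hdn, _⟩, hsq⟩
      have ht1 : 1 ≤ t := Nat.pos_of_dvd_of_pos hdn (by omega)
      have htn : t ≤ n.toNat := Nat.le_of_dvd (by omega) hdn
      refine ⟨⟨ht1, by have := Nat.le_sqrt.2 hsq; omega⟩, ?_, ?_⟩
      · rw [← hcast]; exact_mod_cast hdn
      · rw [← hcast]; exact_mod_cast htn
  rw [hset]
  apply Finset.sum_congr rfl
  intro d hd
  simp only [Finset.mem_filter, Nat.mem_divisors] at hd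
  have hfd : PySem.Int.floordiv n d = ((n.toNat / d : Nat) : Int) := by
    conv_lhs => rw [← hcast]
    exact PySem.Int.floordiv_natCast _ _
  rw [hfd]
  apply if_congr _ rfl rfl
  constructor <;> intro h <;> exact_mod_cast h

lemma sumA_eq (end_ n : Int) (h1 : 1 ≤ n) (hne : n ≤ end_) :
    ∑ t ∈ Finset.Ico 1 (Nat.sqrt end_.toNat + 1), pvFA end_ n t = (n.toNat.divisors.card : Int) := by
  have he : end_ = ((end_.toNat : Int)) := by omega
  calc ∑ t ∈ Finset.Ico 1 (Nat.sqrt end_.toNat + 1), pvFA end_ n t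
      = ∑ t ∈ Finset.Ico 1 (Nat.sqrt end_.toNat + 1), pvFA ((end_.toNat : Int)) n t := by
        rw [← he]
    _ = _ := by
        rw [ico_to_divisors n h1 end_.toNat (by omega), pvKey n.toNat end_.toNat (by omega) (by omega)]

lemma sumB_eq (n : Int) (h1 : 1 ≤ n) :
    ∑ t ∈ Finset.Ico 1 (Nat.sqrt n.toNat + 1), pvFB n t = (n.toNat.divisors.card : Int) := by
  have hn' : (1:Nat) ≤ n.toNat := by omega
  have hcast : ((n.toNat : Int)) = n := by omega
  -- first: pvFB agrees with the pvFA-weight at X = n.toNat on the Ico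
  have hcong : ∀ t ∈ Finset.Ico 1 (Nat.sqrt n.toNat + 1), pvFB n t = pvFA ((n.toNat : Int)) n t := by
    intro t ht
    simp only [Finset.mem_Ico] at ht
    have ht1 : 1 ≤ t := ht.1
    have htsq : t * t ≤ n.toNat := Nat.le_sqrt.1 (by omega)
    by_cases hd : (t : Int) ∣ n
    · obtain ⟨k, hk⟩ := hd
      have hkpos : 0 < k := by nlinarith [ht1, h1, hk]
      have hfd : PySem.Int.floordiv n t = k := by
        rw [hk, mul_comm]
        rw [PySem.Int.floordiv_eq_ediv_of_pos (by omega)]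
        exact Int.mul_ediv_cancel k (by omega)
      have htn : (t : Int) ≤ n := by nlinarith
      have hdvd : (t : Int) ∣ n := ⟨k, hk⟩
      rw [pvFB, pvFA, if_pos hdvd, if_pos (show ((t:Int) ∣ n ∧ (t:Int) ≤ n) from ⟨hdvd, htn⟩), hfd, hcast]
      -- (t ≠ k) ↔ (k * k > n)
      have hiff : ((t : Int) ≠ k) ↔ (k * k > n) := by
        constructor
        · intro hne
          have htk : (t:Int) < k := by
            rcases lt_trichotomy ((t:Int)) k with h | h | h
            · exact h
            · exact absurd h hne
            · exfalso
              have h2 : ((t*t : Nat) : Int) ≤ n := by rw [← hcast]; exact_mod_cast htsq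
              push_cast at h2
              nlinarith
          nlinarith
        · intro hgt hEq
          rw [← hEq] at hgt
          have h2 : ((t*t : Nat) : Int) ≤ n := by rw [← hcast]; exact_mod_cast htsq
          push_cast at h2
          omega
      rw [if_congr hiff rfl rfl]
    · rw [pvFB, pvFA, if_neg hd, if_neg (fun hc => hd hc.1)]
  rw [Finset.sum_congr rfl hcong, ico_to_divisors n h1 n.toNat (le_refl _),
    pvKey n.toNat n.toNat hn' (le_refl _)]

lemma max?_getD_eq_max0 (L : List Int) (hne : L ≠ []) (hnn : ∀ x ∈ L, 0 ≤ x) :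
    (PySem.List.max? L (fun x => x)).getD 0 = pvMax0 L := by
  rcases hm : PySem.List.max? L (fun x => x) with _ | m
  · exact absurd ((PySem.List.max?_eq_none_iff L _).1 hm) hne
  · simp only [Option.getD_some]
    have hmem := PySem.List.max?_mem hm
    exact le_antisymm (le_max0 L hmem)
      (max0_le L m (hnn m hmem) (PySem.List.max?_isMax hm))

lemma max0_replicate (k : Nat) : pvMax0 (List.replicate k (0:Int)) = 0 := by
  induction k with
  | zero => rfl
  | succ k ih => simpa [pvMax0, List.replicate_succ] using ih

lemma pvFB_nonneg (n : Int) (t : Nat) : 0 ≤ pvFB n t := by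
  unfold pvFB; split_ifs <;> norm_num

lemma bTrial_nonneg (n : Int) : 0 ≤ bTrial n 1 (by norm_num) 0 := by
  rw [bTrial_spec]
  have := Finset.sum_nonneg (fun t (_ : t ∈ Finset.Ico (1:Int).toNat (Nat.sqrt n.toNat + 1)) => pvFB_nonneg n t)
  omega

theorem main_eq (start end_ : Int) : get_min_health start end_ = get_min_health_alt start end_ := by
  set len := (end_ - start + 1).toNat with hlendef
  obtain ⟨alen, apt, amax⟩ := aOuter_spec start end_ 1 (by norm_num) (Array.replicate len 0) 0
    (by simpa using hlendef) (by rw [Array.toList_replicate, max0_replicate])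
  set rA := aOuter start end_ 1 (by norm_num) (Array.replicate len 0) 0 with hrA
  rw [Array.toList_replicate] at alen apt
  -- B's counts list as a map
  have hcounts : (PySem.List.pyRange start (end_ + 1) 1).foldl
      (fun acc n => acc ++ [bTrial n 1 (by norm_num) 0]) ([] : List Int)
      = (List.range len).map (fun (k : Nat) => bTrial (start + (k : Int)) 1 (by norm_num) 0) := by
    rw [PySem.List.foldl_append_singleton_eq_map, PySem.List.pyRange_one, List.map_map]
    have : (end_ + 1 - start).toNat = len := by omega
    rw [this]
    simp [Function.comp]
  set counts := (List.range len).map (fun (k : Nat) => bTrial (start + (k : Int)) 1 (by norm_num) 0) with hcountsdef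
  -- the two lists are equal
  have hlistEq : rA.1.toList = counts := by
    apply List.ext_getElem
    · simp [counts, alen]
    · intro p hp1 hp2
      have hplen : p < len := by simpa [alen] using hp1
      have hA : rA.1.toList.getD p 0 = ∑ t ∈ Finset.Ico 1 (Nat.sqrt end_.toNat + 1), pvFA end_ (start + (p : Int)) t := by
        have := apt p (by simpa using hplen)
        rw [List.getD_replicate _ hplen] at this
        simpa using this
      have hB : counts.getD p 0 = bTrial (start + (p : Int)) 1 (by norm_num) 0 := by
        simp [counts, hplen]
      have hAB : rA.1.toList.getD p 0 = counts.getD p 0 := by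
        rw [hA, hB, bTrial_spec]
        simp only [Int.toNat_one]
        set n : Int := start + (p : Int) with hndef
        by_cases hn1 : 1 ≤ n
        · have hnle : n ≤ end_ := by omega
          rw [sumA_eq end_ n hn1 hnle]
          have := sumB_eq n hn1
          simpa using this.symm
        · have hA0 : ∑ t ∈ Finset.Ico 1 (Nat.sqrt end_.toNat + 1), pvFA end_ n t = 0 := by
            apply Finset.sum_eq_zero
            intro t ht
            simp only [Finset.mem_Ico] at ht
            have : ¬ ((t:Int) ∣ n ∧ (t:Int) ≤ n) := by
              rintro ⟨_, hle⟩
              have : (1:Int) ≤ (t:Int) := by exact_mod_cast ht.1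
              omega
            simp [pvFA, this]
          have hB0 : ∑ t ∈ Finset.Ico 1 (Nat.sqrt n.toNat + 1), pvFB n t = 0 := by
            have hz : n.toNat = 0 := by omega
            rw [hz]
            simp
          rw [hA0, hB0]
          simp
      rwa [List.getD_eq_getElem _ _ hp1, List.getD_eq_getElem _ _ hp2] at hAB
  -- highest agrees
  have hmax : rA.2 = (if counts = [] then 0 else (PySem.List.max? counts (fun x => x)).getD 0) := by
    by_cases hnil : counts = []
    · rw [if_pos hnil, amax, hlistEq, hnil]
      rfl
    · rw [if_neg hnil, amax, hlistEq]
      rw [max?_getD_eq_max0 counts hnil]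
      intro x hx
      simp only [counts, List.mem_map] at hx
      obtain ⟨k, _, rfl⟩ := hx
      exact bTrial_nonneg _
  have hAdef : get_min_health start end_ = (PySem.List.count rA.1.toList rA.2 : Int) + 1 := rfl
  have hBdef : get_min_health_alt start end_
      = (PySem.List.count ((PySem.List.pyRange start (end_ + 1) 1).foldl (fun acc n => acc ++ [bTrial n 1 (by norm_num) 0]) ([]:List Int))
          (if ((PySem.List.pyRange start (end_ + 1) 1).foldl (fun acc n => acc ++ [bTrial n 1 (by norm_num) 0]) ([]:List Int)) = [] then 0
           else (PySem.List.max? ((PySem.List.pyRange start (end_ + 1) 1).foldl (fun acc n => acc ++ [bTrial n 1 (by norm_num) 0]) ([]:List Int)) (fun x => x)).getD 0) : Int) + 1 := rfl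
  rw [hAdef, hBdef, hcounts, hlistEq, hmax]

-- ===== VERDICT (by name: the statement is the Claim_ definition above) =====
theorem get_min_health_spec : Claim_equal_get_min_health := by
  intro start end_ _
  exact main_eq start end_
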